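-- pv_equiv track=rewrite | github.com/bbugyi200/dotfiles | home/lib/gai/src/ace/tui/actions/hints/_accept.py | _strip_accept_suffixes
-- ===== SOURCE A (Python) =====
-- def _strip_accept_suffixes(
--     args: list[str],
-- ) -> tuple[list[str] | None, bool, bool]:
--     """Strip ``!`` and ``@`` suffixes from the last arg.
--
--     Returns:
--         A tuple of ``(cleaned_args, should_mail, skip_amend)``.
--         ``cleaned_args`` is ``None`` when the args are invalid (empty after
--         stripping).
--     """
--     should_mail = False
--     skip_amend = False
--     if not args:
--         return None, should_mail, skip_amend
--
--     last_arg = args[-1]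
--     while last_arg.endswith(("!", "@")):
--         if last_arg[-1] == "!":
--             skip_amend = True
--         else:
--             should_mail = True
--         last_arg = last_arg[:-1]
--     args[-1] = last_arg
--
--     # Remove empty last arg, error if no args left
--     if not args[-1]:
--         args.pop()
--     if not args:
--         return None, should_mail, skip_amend
--
--     return args, should_mail, skip_amend
-- ===== SOURCE B (Python) =====
-- def _strip_accept_suffixes(
--     args: list[str],
-- ) -> tuple[list[str] | None, bool, bool]:
--     """Strip ``!`` and ``@`` suffixes from the last arg (rstrip-based)."""
--     if not args:
--         return None, False, False
--
--     last_arg = args[-1]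
--     stripped = last_arg.rstrip("!@")
--     suffix = last_arg[len(stripped):]
--     skip_amend = "!" in suffix
--     should_mail = "@" in suffix
--
--     args[-1] = stripped
--     if not stripped:
--         args.pop()
--     if not args:
--         return None, should_mail, skip_amend
--     return args, should_mail, skip_amend
-- ===== Notes on version B (the rewrite author's own statement) =====
-- stated objective: simpler
-- what changed: Replaces A's char-by-char while loop that interleaves stripping with flag updates by a one-shot rstrip('!@') plus deriving the flags from membership tests on the removed suffix.
import Mathlib
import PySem

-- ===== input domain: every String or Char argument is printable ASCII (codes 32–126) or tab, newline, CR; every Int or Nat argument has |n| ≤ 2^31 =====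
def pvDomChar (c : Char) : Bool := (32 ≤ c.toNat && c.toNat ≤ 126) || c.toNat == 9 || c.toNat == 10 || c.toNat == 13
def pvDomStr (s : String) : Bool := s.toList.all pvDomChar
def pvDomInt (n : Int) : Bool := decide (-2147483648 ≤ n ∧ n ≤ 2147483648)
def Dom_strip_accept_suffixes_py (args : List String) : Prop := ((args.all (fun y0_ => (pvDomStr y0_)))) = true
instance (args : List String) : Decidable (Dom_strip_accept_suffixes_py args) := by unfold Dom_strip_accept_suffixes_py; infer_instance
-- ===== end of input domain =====

-- B replaces A's char-by-char while loop (which interleaves stripping with flag updates) by a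
-- find-boundary-then-inspect-suffix decomposition: rstrip once, flags by membership in the suffix.
-- Both versions mutate `args` in place identically (last element replaced / popped); the theorems
-- below are about the returned value (which contains the resulting list).

-- ===== PORT A =====
-- the `while last_arg.endswith(("!", "@")):` loop of A, on the char list of last_arg
def pvStripLoopA (s : List Char) (should_mail skip_amend : Bool) : List Char × Bool × Bool :=
  if h : (PySem.Chars.endswith s ['!'] || PySem.Chars.endswith s ['@']) = true then
    if PySem.Chars.pyGet? s (-1) = some '!' then
      pvStripLoopA (PySem.Chars.slice s none (some (-1))) should_mail true   -- last_arg = last_arg[:-1]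
    else
      pvStripLoopA (PySem.Chars.slice s none (some (-1))) true skip_amend
  else (s, should_mail, skip_amend)
termination_by s.length
decreasing_by
  all_goals
    have hne : s ≠ [] := by intro hs; subst hs; revert h; decide
    simp only [PySem.Chars.slice_eq_listSlice, PySem.List.slice_to_neg_one,
      List.length_dropLast]
    have := List.length_pos_of_ne_nil hne
    omega

def strip_accept_suffixes_py (args : List String) : Option (List String) × Bool × Bool :=
  if args = [] then (none, false, false)
  else
    let last_arg := (PySem.List.pyGet? args (-1)).getD ""      -- args[-1] (never the default: args ≠ [])
    let r := pvStripLoopA last_arg.toList false false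
    let args1 := args.dropLast ++ [String.ofList r.1]              -- args[-1] = last_arg
    let args2 := if r.1 = [] then args1.dropLast else args1    -- if not args[-1]: args.pop()
    if args2 = [] then (none, r.2.1, r.2.2)
    else (some args2, r.2.1, r.2.2)

-- ===== PORT B =====
def pvBangAt (c : Char) : Bool := c == '!' || c == '@'

-- hand port of str.rstrip("!@") (PySem has no chars-argument rstrip); exact: drops trailing '!'/'@'
def pvRstripBA (cs : List Char) : List Char :=
  (cs.reverse.dropWhile pvBangAt).reverse

def strip_accept_suffixes_py_alt (args : List String) : Option (List String) × Bool × Bool :=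
  if args = [] then (none, false, false)
  else
    let last_arg := (PySem.List.pyGet? args (-1)).getD ""                        -- args[-1]
    let stripped := pvRstripBA last_arg.toList                                   -- last_arg.rstrip("!@")
    let suffix := PySem.Chars.slice last_arg.toList (some (stripped.length : Int)) none  -- last_arg[len(stripped):]
    let skip_amend := PySem.Chars.isIn ['!'] suffix
    let should_mail := PySem.Chars.isIn ['@'] suffix
    let args2 := if stripped = [] then args.dropLast                             -- args[-1] = stripped; pop if empty
                 else args.dropLast ++ [String.ofList stripped]
    if args2 = [] then (none, should_mail, skip_amend)
    else (some args2, should_mail, skip_amend)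

-- ===== PRECONDITION & SPEC =====
def Spec_strip_accept_suffixes_py (args : List String) (out : Option (List String) × Bool × Bool) : Prop := out = strip_accept_suffixes_py_alt args
instance (args : List String) (out : Option (List String) × Bool × Bool) : Decidable (Spec_strip_accept_suffixes_py args out) := by unfold Spec_strip_accept_suffixes_py; infer_instance

-- ===== CLAIM (what is proved, stated in full; the proofs are below) =====
def Claim_equal_strip_accept_suffixes_py : Prop := ∀ (args : List String), Dom_strip_accept_suffixes_py args → Spec_strip_accept_suffixes_py args (strip_accept_suffixes_py args)

-- ===== LEMMAS AND PROOFS =====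

lemma pv_pyGet_concat (xs : List Char) (c : Char) :
    PySem.List.pyGet? (xs ++ [c]) (-1) = some c := by
  simp [PySem.List.pyGet?, PySem.List.pyIdx?]

lemma pv_endswith_concat (xs : List Char) (c d : Char) :
    PySem.Chars.endswith (xs ++ [c]) [d] = (d == c) := by
  rw [Bool.eq_iff_iff]
  simp only [PySem.Chars.endswith_iff, beq_iff_eq]
  constructor
  · rintro ⟨pre, hp⟩
    have := (List.append_inj' hp (by simp)).2
    simpa using this
  · rintro rfl; exact ⟨xs, rfl⟩

lemma pv_loopA_rev (l : List Char) (sm sa : Bool) :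
    pvStripLoopA l.reverse sm sa =
      ((l.dropWhile pvBangAt).reverse,
       sm || (l.takeWhile pvBangAt).contains '@',
       sa || (l.takeWhile pvBangAt).contains '!') := by
  induction l generalizing sm sa with
  | nil =>
      rw [pvStripLoopA]
      have h1 : PySem.Chars.endswith ([] : List Char) ['!'] = false := by decide
      have h2 : PySem.Chars.endswith ([] : List Char) ['@'] = false := by decide
      simp [h1, h2]
  | cons c t ih =>
      rw [List.reverse_cons, pvStripLoopA]
      have hget : PySem.Chars.pyGet? (t.reverse ++ [c]) (-1) = some c := by
        rw [PySem.Chars.pyGet?_eq_listPyGet?]; exact pv_pyGet_concat _ _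
      by_cases hc : c = '!'
      · subst hc
        rw [dif_pos (by simp [pv_endswith_concat]), if_pos (by rw [hget])]
        rw [PySem.Chars.slice_eq_listSlice, PySem.List.slice_to_neg_one, List.dropLast_concat, ih]
        simp [pvBangAt]
      · by_cases hc2 : c = '@'
        · subst hc2
          rw [dif_pos (by simp [pv_endswith_concat]), if_neg (by rw [hget]; simp)]
          rw [PySem.Chars.slice_eq_listSlice, PySem.List.slice_to_neg_one, List.dropLast_concat, ih]
          simp [pvBangAt]
        · rw [dif_neg (by
            simp only [pv_endswith_concat, Bool.or_eq_true, beq_iff_eq]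
            rintro (h | h)
            · exact hc h.symm
            · exact hc2 h.symm)]
          have hp : pvBangAt c = false := by simp [pvBangAt, hc, hc2]
          simp [List.dropWhile, List.takeWhile, hp]

lemma pv_loopA (s : List Char) (sm sa : Bool) :
    pvStripLoopA s sm sa =
      ((s.reverse.dropWhile pvBangAt).reverse,
       sm || (s.reverse.takeWhile pvBangAt).contains '@',
       sa || (s.reverse.takeWhile pvBangAt).contains '!') := by
  have := pv_loopA_rev s.reverse sm sa
  rwa [List.reverse_reverse] at this

lemma pv_suffix_eq (t : List Char) :
    PySem.Chars.slice t (some ((pvRstripBA t).length : Int)) none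
      = (t.reverse.takeWhile pvBangAt).reverse := by
  rw [PySem.Chars.slice_eq_listSlice, PySem.List.slice_from t (by positivity), Int.toNat_natCast]
  set a := List.dropWhile pvBangAt t.reverse with ha
  set b := List.takeWhile pvBangAt t.reverse with hb
  have ht : t = a.reverse ++ b.reverse := by
    rw [ha, hb, ← List.reverse_append, List.takeWhile_append_dropWhile, List.reverse_reverse]
  have h2 : pvRstripBA t = a.reverse := rfl
  rw [h2, ht, List.drop_left]

lemma pv_isIn_singleton (c : Char) (ys : List Char) :
    PySem.Chars.isIn [c] ys = ys.contains c := by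
  rw [Bool.eq_iff_iff]
  simp only [PySem.Chars.isIn_iff_infix, List.contains_iff_mem]
  constructor
  · intro h; exact h.subset (by simp)
  · intro h
    obtain ⟨s, t', rfl⟩ := List.append_of_mem h
    exact ⟨s, t', by simp⟩

lemma pv_contains_reverse (ys : List Char) (c : Char) :
    ys.reverse.contains c = ys.contains c := by
  rw [Bool.eq_iff_iff]; simp

-- ===== VERDICT (by name: the statement is the Claim_ definition above) =====
theorem strip_accept_suffixes_py_spec : Claim_equal_strip_accept_suffixes_py := by
  intro args _
  unfold Spec_strip_accept_suffixes_py strip_accept_suffixes_py strip_accept_suffixes_py_alt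
  by_cases h : args = []
  · simp [h]
  · simp only [if_neg h]
    rw [pv_loopA]
    rw [pv_suffix_eq, pv_isIn_singleton, pv_isIn_singleton, pv_contains_reverse,
      pv_contains_reverse]
    simp [pvRstripBA]
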